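-- pv_equiv track=rewrite | github.com/gstlaurent/cpen442_hw2 | cryptoanalysis.py | commadot
-- ===== SOURCE A (Python) =====
-- def commadot(string):
--     res = []
--     for c in string:
--         if c == ".":
--             res += ["d", "o", "t"]
--         elif c == ",":
--             res += ["c", "o", "m", "m", "a"]
--         else:
--             res.append(c)
--     return "".join(res)
-- ===== SOURCE B (Python) =====
-- def commadot(string):
--     return string.replace(".", "dot").replace(",", "comma")
-- ===== Notes on version B (the rewrite author's own statement) =====
-- stated objective: idiomatic
-- what changed: Replaces the per-character accumulator loop that builds a list of fragments and joins them with two chained str.replace passes (one per delimiter); correct because 'dot' and 'comma' contain neither '.' nor ','.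
import Mathlib
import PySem

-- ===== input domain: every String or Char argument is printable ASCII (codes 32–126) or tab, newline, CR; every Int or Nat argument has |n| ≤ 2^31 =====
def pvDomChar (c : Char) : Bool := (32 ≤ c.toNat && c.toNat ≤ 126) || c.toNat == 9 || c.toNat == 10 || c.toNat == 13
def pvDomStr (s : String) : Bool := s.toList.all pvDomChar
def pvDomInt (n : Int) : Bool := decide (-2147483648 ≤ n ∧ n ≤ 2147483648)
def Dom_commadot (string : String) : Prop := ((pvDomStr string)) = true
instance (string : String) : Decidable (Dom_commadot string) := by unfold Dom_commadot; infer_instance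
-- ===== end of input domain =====

-- B replaces A's per-character accumulator loop with two chained str.replace passes (idiomatic).

-- ===== PORT A =====
def commadot (string : String) : String :=
  PySem.Str.join "" (string.toList.foldl
    (fun res c =>
      if c = '.' then res ++ ["d", "o", "t"]
      else if c = ',' then res ++ ["c", "o", "m", "m", "a"]
      else res ++ [String.ofList [c]]) [])

-- ===== PORT B =====
def commadot_alt (string : String) : String :=
  PySem.Str.replace (PySem.Str.replace string "." "dot") "," "comma"

-- ===== PRECONDITION & SPEC =====
def Spec_commadot (string : String) (out : String) : Prop := out = commadot_alt string
instance (string : String) (out : String) : Decidable (Spec_commadot string out) := by unfold Spec_commadot; infer_instance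

-- ===== CLAIM (what is proved, stated in full; the proofs are below) =====
def Claim_equal_commadot : Prop := ∀ (string : String), Dom_commadot string → Spec_commadot string (commadot string)

-- ===== LEMMAS AND PROOFS =====

-- empty separator: join is flatten
theorem pv_join_empty (ps : List (List Char)) : PySem.Chars.join [] ps = ps.flatten := by
  induction ps with
  | nil => simp [PySem.Chars.join_nil]
  | cons p rest ih =>
    cases rest with
    | nil => simp [PySem.Chars.join_singleton]
    | cons q r => simpa [PySem.Chars.join_cons_cons] using ih

-- single-character `old`: replace.go is a flatMap
theorem pv_go_single (o : Char) (new : List Char) :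
    ∀ (fuel : Nat) (l acc : List Char), l.length ≤ fuel →
      PySem.Chars.replace.go [o] new fuel l acc
        = acc.reverse ++ l.flatMap (fun c => if c = o then new else [c]) := by
  intro fuel
  induction fuel with
  | zero =>
    intro l acc h
    have : l = [] := List.length_eq_zero_iff.mp (Nat.le_zero.mp h)
    subst this
    simp [PySem.Chars.replace.go]
  | succ n ih =>
    intro l acc h
    cases l with
    | nil => simp [PySem.Chars.replace.go]
    | cons c t =>
      simp only [PySem.Chars.replace.go]
      by_cases hc : c = o
      · subst hc
        have : List.isPrefixOf [c] (c :: t) = true := by simp [List.isPrefixOf]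
        rw [if_pos this]
        have ht : t.length ≤ n := by simpa using Nat.lt_succ_iff.mp (by simpa using h)
        rw [show List.drop [c].length (c :: t) = t from rfl,
           ih t (new.reverse ++ acc) ht]
        simp [List.flatMap_cons]
      · have : List.isPrefixOf [o] (c :: t) = false := by
          simp [List.isPrefixOf]
          exact fun h' => hc h'.symm
        rw [if_neg (by simp [this])]
        have ht : t.length ≤ n := by simpa using Nat.lt_succ_iff.mp (by simpa using h)
        rw [ih t (c :: acc) ht]
        simp [List.flatMap_cons, hc]

theorem pv_replace_single (l : List Char) (o : Char) (new : List Char) :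
    PySem.Chars.replace l [o] new = l.flatMap (fun c => if c = o then new else [c]) := by
  have := pv_go_single o new l.length l [] (le_refl _)
  simpa [PySem.Chars.replace] using this

-- A's output, characterised as one flatMap over the characters
theorem pv_A_toList (s : String) :
    (commadot s).toList
      = s.toList.flatMap (fun c =>
          if c = '.' then ['d', 'o', 't']
          else if c = ',' then ['c', 'o', 'm', 'm', 'a'] else [c]) := by
  unfold commadot
  have hf : (fun (res : List String) (c : Char) =>
      if c = '.' then res ++ ["d", "o", "t"]
      else if c = ',' then res ++ ["c", "o", "m", "m", "a"]
      else res ++ [String.ofList [c]])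
      = (fun res c => res ++
          (if c = '.' then ["d", "o", "t"]
           else if c = ',' then ["c", "o", "m", "m", "a"] else [String.ofList [c]])) := by
    funext res c; split_ifs <;> rfl
  rw [hf, PySem.List.foldl_append_eq_flatMap, PySem.Str.toList_join,
     show ("".toList) = ([] : List Char) from rfl, pv_join_empty, List.nil_append]
  induction s.toList with
  | nil => rfl
  | cons c t ih =>
    simp only [List.flatMap_cons, List.map_append, List.flatten_append, ih]
    split_ifs <;> simp

theorem commadot_toList_eq (s : String) : (commadot s).toList = (commadot_alt s).toList := by
  rw [pv_A_toList]
  unfold commadot_alt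
  rw [PySem.Str.toList_replace, PySem.Str.toList_replace,
     show (".".toList) = ['.'] from rfl, show (",".toList) = [','] from rfl,
     pv_replace_single, pv_replace_single]
  rw [List.flatMap_assoc]
  apply List.flatMap_congr
  intro c _
  by_cases h1 : c = '.'
  · subst h1; rfl
  · by_cases h2 : c = ','
    · subst h2; rfl
    · simp [h1, h2]

-- ===== VERDICT (by name: the statement is the Claim_ definition above) =====
theorem commadot_spec : Claim_equal_commadot := by
  intro s _
  unfold Spec_commadot
  have := commadot_toList_eq s
  exact String.toList_injective this
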